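-- pv_equiv track=rewrite | github.com/reiman2222/school-assigments | crypt/assn3/BreakV.py | keyMatrixToStrings
-- ===== SOURCE A (Python) =====
-- import itertools
--
-- def keyMatrixToStrings(keys):
--     keyL = list(itertools.product(*keys))
--
--     kS = []
--     for l in keyL:
--         k = ''
--         for c in l:
--             k += c
--         kS.append(k)
--     return kS
-- ===== SOURCE B (Python) =====
-- def keyMatrixToStrings(keys):
--     result = ['']
--     for ks in keys:
--         ks = list(ks)
--         result = [prefix + c for prefix in result for c in ks]
--     return result
-- ===== Notes on version B (the rewrite author's own statement) =====
-- stated objective: simpler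
-- what changed: Replaces itertools.product-then-join (build all tuples, then concatenate each in a nested loop) by a single growing-prefix fold: start from [''] and extend every prefix with each key of the next list.
import Mathlib
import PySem

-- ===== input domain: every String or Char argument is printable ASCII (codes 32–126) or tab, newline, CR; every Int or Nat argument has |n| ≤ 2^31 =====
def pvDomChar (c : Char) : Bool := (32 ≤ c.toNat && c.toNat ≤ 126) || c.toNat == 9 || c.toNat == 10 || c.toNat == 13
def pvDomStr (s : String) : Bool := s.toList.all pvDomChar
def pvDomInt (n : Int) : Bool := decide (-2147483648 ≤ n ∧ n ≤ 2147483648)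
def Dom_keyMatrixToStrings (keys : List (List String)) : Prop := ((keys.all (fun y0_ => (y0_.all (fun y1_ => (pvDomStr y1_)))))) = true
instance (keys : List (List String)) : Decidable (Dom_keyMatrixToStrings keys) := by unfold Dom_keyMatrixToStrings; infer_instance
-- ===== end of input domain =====

-- B replaces product-then-join by a single growing-prefix fold (objective: simpler decomposition, same cost).

-- ===== PORT A =====
-- itertools.product(*keys), leftmost factor outermost
def pvProdA : List (List String) → List (List String)
  | [] => [[]]
  | l :: rest => l.flatMap (fun x => (pvProdA rest).map (fun t => x :: t))

def keyMatrixToStrings (keys : List (List String)) : List String :=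
  let keyL := pvProdA keys
  keyL.foldl (fun kS l => kS ++ [l.foldl (fun k c => k ++ c) ""]) []

-- ===== PORT B =====
def keyMatrixToStrings_alt (keys : List (List String)) : List String :=
  keys.foldl (fun result ks => result.flatMap (fun p => ks.map (fun c => p ++ c))) [""]

-- ===== PRECONDITION & SPEC =====
def Spec_keyMatrixToStrings (keys : List (List String)) (out : List String) : Prop := out = keyMatrixToStrings_alt keys
instance (keys : List (List String)) (out : List String) : Decidable (Spec_keyMatrixToStrings keys out) := by unfold Spec_keyMatrixToStrings; infer_instance

-- ===== CLAIM (what is proved, stated in full; the proofs are below) =====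
def Claim_equal_keyMatrixToStrings : Prop := ∀ (keys : List (List String)), Dom_keyMatrixToStrings keys → Spec_keyMatrixToStrings keys (keyMatrixToStrings keys)

-- ===== LEMMAS AND PROOFS =====

-- joining a tuple from an arbitrary accumulator
theorem pv_joinShift (l : List String) (s : String) :
    l.foldl (fun k c => k ++ c) s = s ++ l.foldl (fun k c => k ++ c) "" := by
  induction l generalizing s with
  | nil => simp
  | cons x t ih =>
    simp only [List.foldl_cons]
    rw [ih (s ++ x), ih ("" ++ x)]
    simp [String.append_assoc]

-- A's append-singleton loop is a map
theorem pv_foldl_snoc (L : List (List String)) (acc : List String) :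
    L.foldl (fun kS l => kS ++ [l.foldl (fun k c => k ++ c) ""]) acc
      = acc ++ L.map (fun l => l.foldl (fun k c => k ++ c) "") := by
  induction L generalizing acc with
  | nil => simp
  | cons x t ih => simp [ih]

-- B's fold from any prefix set equals flatMapping each prefix over A's joined product
theorem pv_main (keys : List (List String)) (acc : List String) :
    keys.foldl (fun result ks => result.flatMap (fun p => ks.map (fun c => p ++ c))) acc
      = acc.flatMap (fun p => (pvProdA keys).map (fun t => p ++ t.foldl (fun k c => k ++ c) "")) := by
  induction keys generalizing acc with
  | nil => simp [pvProdA]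
  | cons ks rest ih =>
    simp only [List.foldl_cons, ih, pvProdA]
    rw [List.flatMap_assoc]
    apply List.flatMap_congr  -- congruence over prefixes
    intro p _
    rw [List.map_flatMap]
    rw [List.flatMap_map]
    apply List.flatMap_congr
    intro c _
    rw [List.map_map]
    apply List.map_congr_left
    intro t _
    simp only [Function.comp, List.foldl_cons]
    rw [pv_joinShift t ("" ++ c)]
    simp [String.append_assoc]

-- ===== VERDICT (by name: the statement is the Claim_ definition above) =====
theorem keyMatrixToStrings_spec : Claim_equal_keyMatrixToStrings := by
  intro keys _
  show keyMatrixToStrings keys = keyMatrixToStrings_alt keys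
  rw [keyMatrixToStrings, keyMatrixToStrings_alt, pv_main, pv_foldl_snoc]
  simp
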